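-- pv_equiv track=rewrite | github.com/NikaMemiadze/Cap-Orientation | main.py | generate_instructions
-- ===== SOURCE A (Python) =====
-- def generate_instructions(hats):
--     n = len(hats)
--     segments = []
--     start = None
--
--     for i in range(n):
--         if hats[i] == '':
--             if start is not None:
--                 segments.append((start, i - 1, hats[start]))
--                 start = None
--         elif start is None or hats[i] != hats[start]:
--             if start is not None:
--                 segments.append((start, i - 1, hats[start]))
--             start = i
--
--     if start is not None:
--         segments.append((start, n - 1, hats[start]))
--
--     forward_flips = []
--     backward_flips = []
--
--     for start, end, direction in segments:
--         if direction == 'F':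
--             if start == end:
--                 backward_flips.append(f"{start}")
--             else:
--                 backward_flips.append(f"{start} & {end}")
--         elif direction == 'B':
--             if start == end:
--                 forward_flips.append(f"{start}")
--             else:
--                 forward_flips.append(f"{start} & {end}")
--
--     if len(forward_flips) <= len(backward_flips):
--         return forward_flips
--     else:
--         return backward_flips
-- ===== SOURCE B (Python) =====
-- def generate_instructions(hats):
--     n = len(hats)
--
--     def flips(tag):
--         starts = [i for i in range(n) if hats[i] == tag and (i == 0 or hats[i - 1] != tag)]
--         ends = [i for i in range(n) if hats[i] == tag and (i == n - 1 or hats[i + 1] != tag)]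
--         return [str(s) if s == e else f"{s} & {e}" for s, e in zip(starts, ends)]
--
--     forward_flips = flips('B')
--     backward_flips = flips('F')
--     return forward_flips if len(forward_flips) <= len(backward_flips) else backward_flips
-- ===== Notes on version B (the rewrite author's own statement) =====
-- stated objective: simpler
-- what changed: Replaces A's stateful run segmentation (an Optional start pointer building a segments list, then a second dispatch loop over the segments) by two independent per-tag passes that detect block starts and block ends with local neighbour comparisons against the fixed tag and pair them with zip.
import Mathlib
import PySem

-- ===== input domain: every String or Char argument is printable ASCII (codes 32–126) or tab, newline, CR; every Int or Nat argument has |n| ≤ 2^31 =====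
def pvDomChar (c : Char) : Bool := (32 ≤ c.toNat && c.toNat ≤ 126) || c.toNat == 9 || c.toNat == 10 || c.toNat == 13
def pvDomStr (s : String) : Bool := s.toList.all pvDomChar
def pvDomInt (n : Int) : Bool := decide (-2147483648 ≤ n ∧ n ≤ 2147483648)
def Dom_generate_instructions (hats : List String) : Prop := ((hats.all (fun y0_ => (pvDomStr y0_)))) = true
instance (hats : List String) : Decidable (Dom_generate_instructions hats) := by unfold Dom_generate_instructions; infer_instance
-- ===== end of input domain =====

-- B replaces A's stateful run segmentation (Optional start pointer + segments list + dispatch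
-- loop) by two independent per-tag passes detecting block starts/ends by local neighbour
-- comparison against the fixed tag, paired with zip (objective: simpler).

-- ===== PORT A =====
-- the body of A's first for-loop (state: (segments, start))
def pvA_step (hats : List String) (st : List (Nat × Nat × String) × Option Nat) (i : Nat) :
    List (Nat × Nat × String) × Option Nat :=
  if hats.getD i "" = "" then
    match st.2 with
    | some s => (st.1 ++ [(s, i - 1, hats.getD s "")], none)
    | none => (st.1, none)
  else
    match st.2 with
    | none => (st.1, some i)
    | some s =>
      if hats.getD i "" ≠ hats.getD s "" then
        (st.1 ++ [(s, i - 1, hats.getD s "")], some i)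
      else (st.1, st.2)

-- the body of A's second for-loop (state: (forward_flips, backward_flips))
def pvA_flip (fb : List String × List String) (seg : Nat × Nat × String) : List String × List String :=
  if seg.2.2 = "F" then
    (fb.1, fb.2 ++ [if seg.1 = seg.2.1 then PySem.Int.toStr (seg.1 : Int)
                    else PySem.Int.toStr (seg.1 : Int) ++ " & " ++ PySem.Int.toStr (seg.2.1 : Int)])
  else if seg.2.2 = "B" then
    (fb.1 ++ [if seg.1 = seg.2.1 then PySem.Int.toStr (seg.1 : Int)
              else PySem.Int.toStr (seg.1 : Int) ++ " & " ++ PySem.Int.toStr (seg.2.1 : Int)], fb.2)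
  else fb

def generate_instructions (hats : List String) : List String :=
  let n := hats.length
  let st := (List.range n).foldl (pvA_step hats) ([], none)
  let segments := st.1 ++ (match st.2 with
    | some s => [(s, n - 1, hats.getD s "")]
    | none => [])
  let fb := segments.foldl pvA_flip ([], [])
  if fb.1.length ≤ fb.2.length then fb.1 else fb.2

-- ===== PORT B =====
-- the condition of B's 'starts' comprehension: hats[i] == tag and (i == 0 or hats[i-1] != tag)
def pvB_startP (hats : List String) (tag : String) (i : Nat) : Bool :=
  hats.getD i "" == tag && (i == 0 || !(hats.getD (i - 1) "" == tag))

-- the condition of B's 'ends' comprehension: hats[i] == tag and (i == n-1 or hats[i+1] != tag)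
def pvB_endP (hats : List String) (tag : String) (n : Nat) (i : Nat) : Bool :=
  hats.getD i "" == tag && (i == n - 1 || !(hats.getD (i + 1) "" == tag))

-- str(s) if s == e else f"{s} & {e}"
def pvB_mk (p : Nat × Nat) : String :=
  if p.1 = p.2 then PySem.Int.toStr (p.1 : Int)
  else PySem.Int.toStr (p.1 : Int) ++ " & " ++ PySem.Int.toStr (p.2 : Int)

-- B's local helper 'flips(tag)'
def pvB_flips (hats : List String) (n : Nat) (tag : String) : List String :=
  let starts := (List.range n).filter (pvB_startP hats tag)
  let ends := (List.range n).filter (pvB_endP hats tag n)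
  (starts.zip ends).map pvB_mk

def generate_instructions_alt (hats : List String) : List String :=
  let n := hats.length
  let forward_flips := pvB_flips hats n "B"
  let backward_flips := pvB_flips hats n "F"
  if forward_flips.length ≤ backward_flips.length then forward_flips else backward_flips

-- ===== PRECONDITION & SPEC =====
def Spec_generate_instructions (hats : List String) (out : List String) : Prop := out = generate_instructions_alt hats
instance (hats : List String) (out : List String) : Decidable (Spec_generate_instructions hats out) := by unfold Spec_generate_instructions; infer_instance

-- ===== CLAIM (what is proved, stated in full; the proofs are below) =====
def Claim_equal_generate_instructions : Prop := ∀ (hats : List String), Dom_generate_instructions hats → Spec_generate_instructions hats (generate_instructions hats)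

-- ===== LEMMAS AND PROOFS =====

-- interior run boundaries (i = 0 or hats[i] ≠ hats[i-1]), for i < len hats
def pvCutP (hats : List String) (i : Nat) : Bool :=
  i == 0 || !(hats.getD i "" == hats.getD (i - 1) "")

def pvCuts (hats : List String) : List Nat :=
  (List.range hats.length).filter (pvCutP hats)

-- the cut list with the sentinel n appended
def pvCutsN (hats : List String) : List Nat := pvCuts hats ++ [hats.length]

-- boundaries including the sentinel, as one predicate over range (n+1)
def pvCutNP (hats : List String) (n : Nat) (i : Nat) : Bool :=
  i == 0 || i == n || !(hats.getD i "" == hats.getD (i - 1) "")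

def pvZ (hats : List String) : List (Nat × Nat) :=
  (pvCutsN hats).zip (pvCutsN hats).tail

def pvEmitSeg (hats : List String) (p : Nat × Nat) : Option (Nat × Nat × String) :=
  if hats.getD p.1 "" = "" then none else some (p.1, p.2 - 1, hats.getD p.1 "")

def pvSegsOf (hats : List String) : List (Nat × Nat × String) :=
  ((pvCuts hats).zip (pvCuts hats).tail).filterMap (pvEmitSeg hats)

def pvStartOf (hats : List String) : Option Nat :=
  if hats.length = 0 then none
  else if hats.getD ((pvCuts hats).getLastD 0) "" = "" then none
  else some ((pvCuts hats).getLastD 0)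

lemma pvCuts_mem_lt (hats : List String) : ∀ s ∈ pvCuts hats, s < hats.length := by
  intro s hs
  have := List.mem_range.mp (List.mem_of_mem_filter hs)
  exact this

lemma pvCuts_pairwise (hats : List String) : (pvCuts hats).Pairwise (· < ·) := by
  exact List.Pairwise.sublist List.filter_sublist List.pairwise_lt_range

lemma pvCuts_ne_nil (hats : List String) (h : hats.length ≠ 0) : pvCuts hats ≠ [] := by
  have h0 : (0 : Nat) ∈ pvCuts hats := by
    refine List.mem_filter.mpr ⟨List.mem_range.mpr (Nat.pos_of_ne_zero h), ?_⟩
    simp [pvCutP]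
  exact List.ne_nil_of_mem h0

lemma pvLe_last : ∀ (l : List Nat), l.Pairwise (· < ·) → ∀ a ∈ l, a ≤ l.getLastD 0 := by
  intro l
  induction l using List.reverseRecOn with
  | nil => intro _ a ha; simp at ha
  | append_singleton ys y ih =>
    intro hp a ha
    have hlast : (ys ++ [y]).getLastD 0 = y := by
      simp [List.getLastD_eq_getLast?]
    rw [hlast]
    rcases List.mem_append.mp ha with h | h
    · have := (List.pairwise_append.mp hp).2.2
      exact Nat.le_of_lt (this a h y (by simp))
    · simp at h; omega

lemma pvZip_adj : ∀ (l : List Nat), l.Pairwise (· < ·) → ∀ p ∈ l.zip l.tail, p.1 < p.2 := by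
  intro l
  induction l with
  | nil => intro _ p hp; simp at hp
  | cons x xs ih =>
    intro hp p hmem
    cases xs with
    | nil => simp at hmem
    | cons y ys =>
      simp only [List.tail_cons, List.zip_cons_cons] at hmem
      rcases List.mem_cons.mp hmem with h | h
      · subst h; exact (List.pairwise_cons.mp hp).1 y (by simp)
      · exact ih (List.pairwise_cons.mp hp).2 p (by simpa using h)

-- between two adjacent entries of a sorted list lies no element of the list
lemma pvZip_gap : ∀ (l : List Nat), l.Pairwise (· < ·) → ∀ p ∈ l.zip l.tail, ∀ a ∈ l,
    ¬(p.1 < a ∧ a < p.2) := by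
  intro l
  induction l with
  | nil => intro _ p hp; simp at hp
  | cons x xs ih =>
    intro hp p hmem a ha hab
    cases xs with
    | nil => simp at hmem
    | cons y ys =>
      simp only [List.tail_cons, List.zip_cons_cons] at hmem
      have hpc := List.pairwise_cons.mp hp
      rcases List.mem_cons.mp hmem with h | h
      · subst h
        simp only at hab
        rcases List.mem_cons.mp ha with rfl | ha'
        · omega
        · have := hpc.1 a ha'
          rcases List.mem_cons.mp ha' with rfl | ha''
          · omega
          · have := (List.pairwise_cons.mp hpc.2).1 a ha''
            omega
      · have hp1 : p.1 ∈ y :: ys := (List.of_mem_zip (by simpa using h)).1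
        rcases List.mem_cons.mp ha with rfl | ha'
        · have := hpc.1 p.1 hp1
          omega
        · exact ih hpc.2 p (by simpa using h) a ha' hab

lemma pvZipTail_concat : ∀ (l : List Nat) (a : Nat),
    (l ++ [a]).zip (l ++ [a]).tail
      = l.zip l.tail ++ (match l.getLast? with | some b => [(b, a)] | none => []) := by
  intro l
  induction l with
  | nil => intro a; simp
  | cons x xs ih =>
    intro a
    cases xs with
    | nil => simp
    | cons y ys =>
      have := ih a
      simp only [List.cons_append, List.tail_cons, List.zip_cons_cons] at *
      rw [this]
      simp [List.getLast?_cons_cons]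

lemma pvRunConst (hats : List String) :
    ∀ i, (pvCuts hats).getLastD 0 ≤ i → i < hats.length →
      hats.getD i "" = hats.getD ((pvCuts hats).getLastD 0) "" := by
  intro i hle
  induction i, hle using Nat.le_induction with
  | base => intro _; rfl
  | succ j hj ih =>
    intro hlt
    have hjn : j < hats.length := by omega
    have hcut : pvCutP hats (j + 1) = false := by
      by_contra hc
      have hmem : (j + 1) ∈ pvCuts hats :=
        List.mem_filter.mpr ⟨List.mem_range.mpr hlt, by simpa using hc⟩
      have := pvLe_last _ (pvCuts_pairwise hats) _ hmem
      omega
    have heq : hats.getD (j + 1) "" = hats.getD j "" := by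
      have := hcut
      simp [pvCutP] at this
      simpa using this
    rw [heq, ih hjn]

lemma pvCutP_concat_lt (hats : List String) (x : String) (i : Nat) (h : i < hats.length) :
    pvCutP (hats ++ [x]) i = pvCutP hats i := by
  unfold pvCutP
  rw [List.getD_append _ _ _ _ h, List.getD_append _ _ _ _ (by omega : i - 1 < hats.length)]

lemma pvCuts_concat (hats : List String) (x : String) :
    pvCuts (hats ++ [x])
      = pvCuts hats ++ (if pvCutP (hats ++ [x]) hats.length then [hats.length] else []) := by
  unfold pvCuts
  rw [List.length_append, List.length_singleton, List.range_succ, List.filter_append]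
  congr 1
  · exact List.filter_congr (fun i hi => pvCutP_concat_lt hats x i (List.mem_range.mp hi))
  · cases h : pvCutP (hats ++ [x]) hats.length <;> simp [List.filter, h]

lemma pvA_step_snd (hats : List String) (st : List (Nat × Nat × String) × Option Nat) (i : Nat) :
    (pvA_step hats st i).2 = none ∨ (pvA_step hats st i).2 = some i ∨ (pvA_step hats st i).2 = st.2 := by
  rcases st with ⟨segs, start⟩
  cases start <;> simp [pvA_step] <;> split_ifs <;> simp

lemma pvA_fold_congr (hats : List String) (x : String) :
    ∀ (l : List Nat) (st : List (Nat × Nat × String) × Option Nat),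
    (∀ i ∈ l, i < hats.length) → (∀ s, st.2 = some s → s < hats.length) →
    l.foldl (pvA_step (hats ++ [x])) st = l.foldl (pvA_step hats) st := by
  intro l
  induction l with
  | nil => intro st _ _; rfl
  | cons i l ih =>
    intro st hl hst
    have hi : i < hats.length := hl i (by simp)
    have hstep : pvA_step (hats ++ [x]) st i = pvA_step hats st i := by
      obtain ⟨segs, start⟩ := st
      cases start with
      | none => simp [pvA_step, List.getElem?_append_left hi]
      | some s =>
        have hs : s < hats.length := hst s rfl
        simp [pvA_step, List.getElem?_append_left hi, List.getElem?_append_left hs]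
    rw [List.foldl_cons, List.foldl_cons, hstep]
    refine ih _ (fun j hj => hl j (by simp [hj])) (fun s hs => ?_)
    rcases pvA_step_snd hats st i with h | h | h
    · rw [h] at hs; exact absurd hs (by simp)
    · rw [h] at hs; injection hs with hsi; omega
    · rw [h] at hs; exact hst s hs

lemma pvGetLastD_mem : ∀ (l : List Nat), l ≠ [] → l.getLastD 0 ∈ l := by
  intro l
  induction l using List.reverseRecOn with
  | nil => intro h; exact absurd rfl h
  | append_singleton ys y ih => intro _; simp [List.getLastD_eq_getLast?]

lemma pvGetLastD_concat (l : List Nat) (a : Nat) : (l ++ [a]).getLastD 0 = a := by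
  simp [List.getLastD_eq_getLast?]

lemma pvGetLast?_eq_getLastD (l : List Nat) (h : l ≠ []) : l.getLast? = some (l.getLastD 0) := by
  induction l using List.reverseRecOn with
  | nil => exact absurd rfl h
  | append_singleton ys y ih => simp [List.getLastD_eq_getLast?]

lemma pvEmit_congr (hs : List String) (x : String) (p : Nat × Nat) (h : p.1 < hs.length) :
    pvEmitSeg (hs ++ [x]) p = pvEmitSeg hs p := by
  unfold pvEmitSeg
  rw [List.getD_append _ _ _ _ h]

lemma pvSegs_prefix (hs : List String) (x : String) :
    ((pvCuts hs).zip (pvCuts hs).tail).filterMap (pvEmitSeg (hs ++ [x])) = pvSegsOf hs := by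
  unfold pvSegsOf
  refine List.filterMap_congr (fun p hp => ?_)
  exact pvEmit_congr hs x p (pvCuts_mem_lt hs p.1 ((List.of_mem_zip hp).1))

lemma pvA_master : ∀ hats : List String,
    (List.range hats.length).foldl (pvA_step hats) ([], none) = (pvSegsOf hats, pvStartOf hats) := by
  intro hats
  induction hats using List.reverseRecOn with
  | nil => simp [pvSegsOf, pvStartOf, pvCuts]
  | append_singleton hs x ih =>
    have hstep :
        (List.range (hs ++ [x]).length).foldl (pvA_step (hs ++ [x])) ([], none)
          = pvA_step (hs ++ [x]) (pvSegsOf hs, pvStartOf hs) hs.length := by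
      rw [show (hs ++ [x]).length = hs.length + 1 by simp, List.range_succ, List.foldl_append,
        pvA_fold_congr hs x _ _ (fun i hi => List.mem_range.mp hi) (by simp), ih,
        List.foldl_cons, List.foldl_nil]
    rw [hstep]
    by_cases hn : hs.length = 0
    · obtain rfl : hs = [] := List.eq_nil_of_length_eq_zero hn
      by_cases hx : x = "" <;>
        simp [pvA_step, pvSegsOf, pvStartOf, pvCuts, pvCutP, hx]
    · have hcne : pvCuts hs ≠ [] := pvCuts_ne_nil hs hn
      have hslmem : (pvCuts hs).getLastD 0 ∈ pvCuts hs := pvGetLastD_mem _ hcne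
      have hsln : (pvCuts hs).getLastD 0 < hs.length := pvCuts_mem_lt hs _ hslmem
      have hgx : (hs ++ [x]).getD hs.length "" = x := by
        simp
      have hgl : ∀ (y : String) (i : Nat), i < hs.length → (hs ++ [y]).getD i "" = hs.getD i "" :=
        fun y i hi => List.getD_append _ _ _ _ hi
      have hL : hs.getD (hs.length - 1) "" = hs.getD ((pvCuts hs).getLastD 0) "" :=
        pvRunConst hs _ (by omega) (by omega)
      have hcutn : pvCutP (hs ++ [x]) hs.length = !(x == hs.getD ((pvCuts hs).getLastD 0) "") := by
        unfold pvCutP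
        rw [hgx, hgl x (hs.length - 1) (by omega), hL]
        have h0 : (hs.length == 0) = false := by simp [hn]
        rw [h0, Bool.false_or]
      have hlen1 : ¬ (hs ++ [x]).length = 0 := by simp
      by_cases hxv : x = hs.getD ((pvCuts hs).getLastD 0) ""
      · have hc' : pvCuts (hs ++ [x]) = pvCuts hs := by
          rw [pvCuts_concat, hcutn]
          simp [hxv]
        have hsegs' : pvSegsOf (hs ++ [x]) = pvSegsOf hs := by
          unfold pvSegsOf
          rw [hc']
          exact pvSegs_prefix hs x
        have hstart2 : pvStartOf (hs ++ [x]) = pvStartOf hs := by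
          unfold pvStartOf
          rw [if_neg hlen1, if_neg hn, hc', hgl x _ hsln]
        rw [hsegs', hstart2]
        unfold pvA_step
        rw [hgx]
        by_cases hv : hs.getD ((pvCuts hs).getLastD 0) "" = ""
        · have hx : x = "" := by rw [hxv, hv]
          have hst : pvStartOf hs = none := by
            unfold pvStartOf; rw [if_neg hn, if_pos hv]
          rw [hst]
          simp [hx]
        · have hx : ¬ x = "" := by rw [hxv]; exact hv
          have hst : pvStartOf hs = some ((pvCuts hs).getLastD 0) := by
            unfold pvStartOf; rw [if_neg hn, if_neg hv]
          rw [hst]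
          simp only [List.getD_eq_getElem?_getD, List.getLastD_eq_getLast?] at hv hgl hxv hsln
          simp only [List.getElem?_eq_getElem hsln, Option.getD_some] at hv hxv
          simp [hv, hxv, hgl, hsln]
      · have hc' : pvCuts (hs ++ [x]) = pvCuts hs ++ [hs.length] := by
          rw [pvCuts_concat, hcutn]
          have hb : (x == hs.getD ((pvCuts hs).getLastD 0) "") = false :=
            beq_eq_false_iff_ne.mpr hxv
          rw [hb]
          simp
        have hsegs' : pvSegsOf (hs ++ [x])
            = pvSegsOf hs ++ (if hs.getD ((pvCuts hs).getLastD 0) "" = "" then []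
                else [((pvCuts hs).getLastD 0, hs.length - 1, hs.getD ((pvCuts hs).getLastD 0) "")]) := by
          unfold pvSegsOf
          rw [hc', pvZipTail_concat, pvGetLast?_eq_getLastD _ hcne, List.filterMap_append]
          congr 1
          · exact pvSegs_prefix hs x
          · have he : pvEmitSeg (hs ++ [x]) ((pvCuts hs).getLastD 0, hs.length)
                = if hs.getD ((pvCuts hs).getLastD 0) "" = "" then none
                  else some ((pvCuts hs).getLastD 0, hs.length - 1, hs.getD ((pvCuts hs).getLastD 0) "") := by
              unfold pvEmitSeg
              rw [show ((pvCuts hs).getLastD 0, hs.length).1 = (pvCuts hs).getLastD 0 from rfl,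
                hgl x _ hsln]
            rw [List.filterMap_cons, he]
            split_ifs <;> simp
        have hstart2 : pvStartOf (hs ++ [x]) = if x = "" then none else some hs.length := by
          unfold pvStartOf
          rw [if_neg hlen1, hc', pvGetLastD_concat, hgx]
        rw [hsegs', hstart2]
        unfold pvA_step
        rw [hgx]
        by_cases hv : hs.getD ((pvCuts hs).getLastD 0) "" = ""
        · have hst : pvStartOf hs = none := by
            unfold pvStartOf; rw [if_neg hn, if_pos hv]
          rw [hst]
          have hx : ¬ x = "" := fun h => hxv (by rw [h, hv])
          simp only [List.getD_eq_getElem?_getD, List.getLastD_eq_getLast?] at hv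
          simp [hx, hv]
        · have hst : pvStartOf hs = some ((pvCuts hs).getLastD 0) := by
            unfold pvStartOf; rw [if_neg hn, if_neg hv]
          rw [hst]
          simp only [List.getD_eq_getElem?_getD, List.getLastD_eq_getLast?] at hv hxv hgl hsln
          simp only [List.getElem?_eq_getElem hsln, Option.getD_some] at hv hxv
          by_cases hx : x = ""
          · simp [hx, hgl, hsln, hv]
          · simp [hx, hgl, hsln, hv, hxv]

-- the flip fold over the emitted segments, split by tag
lemma pvSegFold (hats : List String) : ∀ (Z : List (Nat × Nat)) (f b : List String),
    ((Z.filterMap (pvEmitSeg hats)).foldl pvA_flip (f, b))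
      = (f ++ (Z.filter (fun p => hats.getD p.1 "" == "B")).map (fun p => pvB_mk (p.1, p.2 - 1)),
         b ++ (Z.filter (fun p => hats.getD p.1 "" == "F")).map (fun p => pvB_mk (p.1, p.2 - 1))) := by
  intro Z
  induction Z with
  | nil => intro f b; simp
  | cons p Z ih =>
    intro f b
    simp only [pvEmitSeg, pvB_mk, List.getD_eq_getElem?_getD] at ih
    by_cases h0 : hats.getD p.1 "" = ""
    · have h0' : hats[p.1]?.getD "" = "" := by
        simpa [List.getD_eq_getElem?_getD] using h0
      simp [pvEmitSeg, pvB_mk, h0', ih]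
    · by_cases hF : hats.getD p.1 "" = "F"
      · have h0' : hats[p.1]?.getD "" = "F" := by
          simpa [List.getD_eq_getElem?_getD] using hF
        simp [pvEmitSeg, pvA_flip, pvB_mk, h0', ih]
      · by_cases hB : hats.getD p.1 "" = "B"
        · have h0' : hats[p.1]?.getD "" = "B" := by
            simpa [List.getD_eq_getElem?_getD] using hB
          simp [pvEmitSeg, pvA_flip, pvB_mk, h0', ih]
        · have h0' : ¬ hats[p.1]?.getD "" = "" := by
            simpa [List.getD_eq_getElem?_getD] using h0
          have hF' : ¬ hats[p.1]?.getD "" = "F" := by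
            simpa [List.getD_eq_getElem?_getD] using hF
          have hB' : ¬ hats[p.1]?.getD "" = "B" := by
            simpa [List.getD_eq_getElem?_getD] using hB
          simp [pvEmitSeg, pvA_flip, pvB_mk, h0', hF', hB', ih]

lemma pvCutsN_eq (hats : List String) :
    pvCutsN hats = (List.range (hats.length + 1)).filter (pvCutNP hats hats.length) := by
  unfold pvCutsN
  rw [List.range_succ, List.filter_append]
  congr 1
  · refine (List.filter_congr (fun i hi => ?_)).symm
    have hlt := List.mem_range.mp hi
    unfold pvCutNP pvCutP
    have : (i == hats.length) = false := by simp; omega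
    rw [this]
    simp
  · simp [pvCutNP]

lemma pvCutsN_pairwise (hats : List String) : (pvCutsN hats).Pairwise (· < ·) := by
  unfold pvCutsN
  refine List.pairwise_append.mpr ⟨pvCuts_pairwise hats, by simp, ?_⟩
  intro a ha b hb
  simp only [List.mem_singleton] at hb
  subst hb
  exact pvCuts_mem_lt hats a ha

lemma pvCutsN_mem_le (hats : List String) : ∀ a ∈ pvCutsN hats, a ≤ hats.length := by
  intro a ha
  rcases List.mem_append.mp ha with h | h
  · exact Nat.le_of_lt (pvCuts_mem_lt hats a h)
  · simp at h; omega

-- run constancy between adjacent cuts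
lemma pvRunConst2 (hats : List String) (p : Nat × Nat) (hp : p ∈ pvZ hats) :
    ∀ i, p.1 ≤ i → i < p.2 → hats.getD i "" = hats.getD p.1 "" := by
  have hp2 : p.2 ≤ hats.length :=
    pvCutsN_mem_le hats p.2 (List.mem_of_mem_tail (List.of_mem_zip hp).2)
  intro i hle
  induction i, hle using Nat.le_induction with
  | base => intro _; rfl
  | succ j hj ih =>
    intro hlt
    have hjn : j + 1 < hats.length := by omega
    have hnc : pvCutP hats (j + 1) = false := by
      by_contra hc
      have hmem : (j + 1) ∈ pvCutsN hats := by
        refine List.mem_append.mpr (Or.inl ?_)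
        exact List.mem_filter.mpr ⟨List.mem_range.mpr hjn, by simpa using hc⟩
      exact pvZip_gap _ (pvCutsN_pairwise hats) p hp (j + 1) hmem ⟨by omega, by omega⟩
    have heq : hats.getD (j + 1) "" = hats.getD j "" := by
      simp [pvCutP] at hnc
      simpa using hnc
    rw [heq, ih (by omega)]

lemma pvZipFst : ∀ (l : List Nat), (l.zip l.tail).map Prod.fst = l.dropLast := by
  intro l
  induction l with
  | nil => rfl
  | cons x xs ih =>
    cases xs with
    | nil => rfl
    | cons y ys =>
      simp only [List.tail_cons, List.zip_cons_cons, List.map_cons]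
      rw [show ((y :: ys).zip ys) = ((y :: ys).zip (y :: ys).tail) from rfl, ih]
      rfl

lemma pvZipSnd : ∀ (l : List Nat), (l.zip l.tail).map Prod.snd = l.tail := by
  intro l
  induction l with
  | nil => rfl
  | cons x xs ih =>
    cases xs with
    | nil => rfl
    | cons y ys =>
      simp only [List.tail_cons, List.zip_cons_cons, List.map_cons]
      rw [show ((y :: ys).zip ys) = ((y :: ys).zip (y :: ys).tail) from rfl, ih]
      rfl

-- B's starts list = the interior cuts carrying the tag
lemma pvStarts_eq (hats : List String) (t : String) :
    (List.range hats.length).filter (pvB_startP hats t)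
      = (pvCuts hats).filter (fun i => hats.getD i "" == t) := by
  unfold pvCuts
  rw [List.filter_filter]
  refine List.filter_congr (fun i _ => ?_)
  unfold pvB_startP pvCutP
  by_cases h : hats.getD i "" = t
  · subst h
    simp [BEq.comm]
  · have h' : (hats[i]?.getD "" == t) = false := by
      simpa [List.getD_eq_getElem?_getD] using beq_eq_false_iff_ne.mpr h
    simp [List.getD_eq_getElem?_getD, h']

-- B's ends list = the shifted cuts (j-1 for sentinel cuts j > 0) carrying the tag
lemma pvTailMap_eq (hats : List String) :
    (pvCutsN hats).tail.map (fun j => j - 1)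
      = (List.range hats.length).filter (fun i => pvCutNP hats hats.length (i + 1)) := by
  rw [pvCutsN_eq, List.range_succ_eq_map, List.filter_cons_of_pos (by simp [pvCutNP]),
    List.tail_cons, List.filter_map, List.map_map]
  have : ((fun j => j - 1) ∘ Nat.succ) = id := by
    funext x; simp
  rw [this, List.map_id]
  rfl

lemma pvEnds_eq (hats : List String) (t : String) :
    (List.range hats.length).filter (pvB_endP hats t hats.length)
      = ((pvCutsN hats).tail.map (fun j => j - 1)).filter (fun i => hats.getD i "" == t) := by
  rw [pvTailMap_eq, List.filter_filter]
  refine List.filter_congr (fun i hi => ?_)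
  have hlt := List.mem_range.mp hi
  unfold pvB_endP pvCutNP
  by_cases h : hats.getD i "" = t
  · subst h
    have hn1 : (i == hats.length - 1) = (i + 1 == hats.length) := by
      apply Bool.eq_iff_iff.mpr
      simp only [beq_iff_eq]
      omega
    simp [hn1]
  · have h' : (hats[i]?.getD "" == t) = false := by
      simpa [List.getD_eq_getElem?_getD] using beq_eq_false_iff_ne.mpr h
    simp [List.getD_eq_getElem?_getD, h']

-- B's per-tag flips = the emitted strings of the tag's adjacent-cut pairs
lemma pvFlips_eq (hats : List String) (t : String) :
    pvB_flips hats hats.length t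
      = ((pvZ hats).filter (fun p => hats.getD p.1 "" == t)).map (fun p => pvB_mk (p.1, p.2 - 1)) := by
  unfold pvB_flips
  have hstarts : (List.range hats.length).filter (pvB_startP hats t)
      = ((pvZ hats).filter (fun p => hats.getD p.1 "" == t)).map Prod.fst := by
    rw [pvStarts_eq]
    have hmapf : (pvZ hats).map Prod.fst = pvCuts hats := by
      unfold pvZ
      rw [pvZipFst]
      unfold pvCutsN
      simp
    rw [← hmapf, List.filter_map]
    rfl
  have hends : (List.range hats.length).filter (pvB_endP hats t hats.length)
      = ((pvZ hats).filter (fun p => hats.getD p.1 "" == t)).map (fun p => p.2 - 1) := by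
    rw [pvEnds_eq]
    have hfc : (pvZ hats).filter (fun p => hats.getD p.1 "" == t)
        = (pvZ hats).filter (fun p => hats.getD (p.2 - 1) "" == t) := by
      refine List.filter_congr (fun p hp => ?_)
      have hlt : p.1 < p.2 := pvZip_adj _ (pvCutsN_pairwise hats) p hp
      have := pvRunConst2 hats p hp (p.2 - 1) (by omega) (by omega)
      rw [this]
    have hmaps : (pvZ hats).map (fun p => p.2 - 1) = (pvCutsN hats).tail.map (fun j => j - 1) := by
      have h2 : (fun p : Nat × Nat => p.2 - 1) = (fun j => j - 1) ∘ Prod.snd := rfl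
      unfold pvZ
      rw [h2, ← List.map_map, pvZipSnd]
    rw [← hmaps, hfc, List.filter_map]
    rfl
  rw [hstarts, hends]
  simp only [List.zip_map', List.map_map]
  rfl

-- ===== VERDICT (by name: the statement is the Claim_ definition above) =====
theorem generate_instructions_spec : Claim_equal_generate_instructions := by
  unfold Claim_equal_generate_instructions
  intro hats _
  unfold Spec_generate_instructions
  unfold generate_instructions generate_instructions_alt
  simp only [pvA_master]
  have hpair : (pvSegsOf hats ++ (match pvStartOf hats with
      | some s => [(s, hats.length - 1, hats.getD s "")]
      | none => ([] : List (Nat × Nat × String))))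
      = (pvZ hats).filterMap (pvEmitSeg hats) := by
    unfold pvZ pvCutsN
    rw [pvZipTail_concat, List.filterMap_append]
    congr 1
    by_cases hn : hats.length = 0
    · have hc : pvCuts hats = [] := by simp [pvCuts, hn]
      have hst : pvStartOf hats = none := by unfold pvStartOf; rw [if_pos hn]
      rw [hc, hst]
      simp
    · have hcne := pvCuts_ne_nil hats hn
      rw [pvGetLast?_eq_getLastD _ hcne]
      unfold pvStartOf pvEmitSeg
      rw [if_neg hn]
      by_cases hv : hats.getD ((pvCuts hats).getLastD 0) "" = ""
      all_goals simp only [List.getD_eq_getElem?_getD, List.getLastD_eq_getLast?] at hv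
      · simp [hv]
      · simp [hv]
  rw [hpair, pvSegFold hats (pvZ hats) [] [], pvFlips_eq hats "B", pvFlips_eq hats "F"]
  simp
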